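-- pv_equiv track=rewrite | github.com/cianc/AoC2025 | day09.py | red_and_green_full_ranges
-- ===== SOURCE A (Python) =====
-- from typing import List, Tuple, Dict, Set
--
-- def red_and_green_full_ranges(red_and_green_edge_tiles: List[Tuple[int, int]]) -> Dict[int, Tuple[int, int]]:
--     red_and_green_full_ranges = {}
--     for edge_tile in red_and_green_edge_tiles:
--         tile_x, tile_y = edge_tile
--         if tile_y not in red_and_green_full_ranges:
--             red_and_green_full_ranges[tile_y] = set([tile_x])
--         else:
--             red_and_green_full_ranges[tile_y].add(tile_x)
--
--     for row in red_and_green_full_ranges: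
--         start, end = min(red_and_green_full_ranges[row]), max(red_and_green_full_ranges[row])
--         red_and_green_full_ranges[row] = (start, end)
--
--     return red_and_green_full_ranges
-- ===== SOURCE B (Python) =====
-- from typing import List, Tuple, Dict
--
-- def red_and_green_full_ranges(red_and_green_edge_tiles: List[Tuple[int, int]]) -> Dict[int, Tuple[int, int]]:
--     # Single pass: accumulate a running (min, max) per row directly; no sets, no second loop.
--     ranges = {}
--     for tile_x, tile_y in red_and_green_edge_tiles:
--         existing = ranges.get(tile_y)
--         if existing is None:
--             ranges[tile_y] = (tile_x, tile_x)
--         else: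
--             ranges[tile_y] = (min(existing[0], tile_x), max(existing[1], tile_x))
--     return ranges
-- ===== Notes on version B (the rewrite author's own statement) =====
-- stated objective: simpler
-- what changed: Replaces the dict-of-sets plus a second reducing loop with a single pass that keeps a running (min,max) tuple per row, eliminating the set data structure entirely.
import Mathlib
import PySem

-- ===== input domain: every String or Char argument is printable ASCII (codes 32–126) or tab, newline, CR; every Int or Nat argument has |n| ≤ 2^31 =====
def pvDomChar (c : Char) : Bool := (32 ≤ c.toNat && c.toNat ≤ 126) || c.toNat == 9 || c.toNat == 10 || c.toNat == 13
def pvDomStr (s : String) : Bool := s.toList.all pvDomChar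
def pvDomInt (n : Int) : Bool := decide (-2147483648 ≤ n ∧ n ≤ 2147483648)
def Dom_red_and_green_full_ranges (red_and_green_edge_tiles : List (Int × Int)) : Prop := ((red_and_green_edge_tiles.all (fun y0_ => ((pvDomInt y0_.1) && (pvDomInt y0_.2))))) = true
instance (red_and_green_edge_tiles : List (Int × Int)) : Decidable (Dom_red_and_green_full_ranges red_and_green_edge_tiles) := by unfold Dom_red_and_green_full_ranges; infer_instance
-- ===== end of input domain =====

-- B replaces A's dict-of-sets + second min/max reducing loop with one pass keeping a running (min,max) per row (objective: simpler).


-- ===== PORT A =====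
-- first loop: group x's per row y into a set (PySem.Set, insertion order; unused by min/max)
def pvAStep (d : PySem.Dict Int (List Int)) (t : Int × Int) : PySem.Dict Int (List Int) :=
  if d.contains t.2 = false then d.insert t.2 (PySem.Set.ofList [t.1])
  else d.insert t.2 (PySem.Set.add (d.getD t.2 []) t.1)

def red_and_green_full_ranges (red_and_green_edge_tiles : List (Int × Int)) : List (Int × Int × Int) :=
  let d := red_and_green_edge_tiles.foldl pvAStep PySem.Dict.empty
  -- second loop overwrites each key in place with (min, max); returned dict = same keys in order.
  -- every stored set is nonempty, so the .getD 0 default is unreachable (Python's min/max never raise here)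
  d.items.map (fun p =>
    (p.1, (PySem.List.min? p.2 (fun v => v)).getD 0, (PySem.List.max? p.2 (fun v => v)).getD 0))

-- ===== PORT B =====
def pvBStep (d : PySem.Dict Int (Int × Int)) (t : Int × Int) : PySem.Dict Int (Int × Int) :=
  match d.get? t.2 with
  | none => d.insert t.2 (t.1, t.1)
  | some r => d.insert t.2 (min r.1 t.1, max r.2 t.1)

def red_and_green_full_ranges_alt (red_and_green_edge_tiles : List (Int × Int)) : List (Int × Int × Int) :=
  (red_and_green_edge_tiles.foldl pvBStep PySem.Dict.empty).items

-- ===== PRECONDITION & SPEC =====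
def Spec_red_and_green_full_ranges (red_and_green_edge_tiles : List (Int × Int)) (out : List (Int × Int × Int)) : Prop := out = red_and_green_full_ranges_alt red_and_green_edge_tiles
instance (red_and_green_edge_tiles : List (Int × Int)) (out : List (Int × Int × Int)) : Decidable (Spec_red_and_green_full_ranges red_and_green_edge_tiles out) := by unfold Spec_red_and_green_full_ranges; infer_instance

-- ===== CLAIM (what is proved, stated in full; the proofs are below) =====
def Claim_equal_red_and_green_full_ranges : Prop := ∀ (red_and_green_edge_tiles : List (Int × Int)), Dom_red_and_green_full_ranges red_and_green_edge_tiles → Spec_red_and_green_full_ranges red_and_green_edge_tiles (red_and_green_full_ranges red_and_green_edge_tiles)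

-- ===== LEMMAS AND PROOFS =====

-- (min, max) of a nonempty list of ints (A's reduction of a row's set)
def pvH (s : List Int) : Int × Int :=
  ((PySem.List.min? s (fun v => v)).getD 0, (PySem.List.max? s (fun v => v)).getD 0)

-- the invariant tying A's dict (of sets) to B's dict (of running (min,max))
def pvInv (dA : PySem.Dict Int (List Int)) (dB : PySem.Dict Int (Int × Int)) : Prop :=
  dA.keys.Nodup ∧ (∀ p ∈ dA.items, p.2 ≠ []) ∧ dB.items = dA.items.map (fun p => (p.1, pvH p.2))

theorem pvH_add (s : List Int) (x : Int) (hs : s ≠ []) :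
    pvH (PySem.Set.add s x) = (min (pvH s).1 x, max (pvH s).2 x) := by
  obtain ⟨a, t, rfl⟩ := List.exists_cons_of_ne_nil hs
  show pvH (if (a :: t).contains x then a :: t else (a :: t) ++ [x]) = _
  by_cases hc : (a :: t).contains x = true
  · have hx : x ∈ a :: t := by simpa using hc
    have h1 := PySem.List.min?_id_le (PySem.List.min?_id_cons a t) x hx
    have h2 := PySem.List.max?_id_le (PySem.List.max?_id_cons a t) x hx
    have hx' : x = a ∨ x ∈ t := by simpa using hc
    simp [hx', pvH, PySem.List.min?_id_cons, PySem.List.max?_id_cons,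
      min_eq_left h1, max_eq_left h2]
  · have hx' : ¬(x = a ∨ x ∈ t) := by simpa using hc
    simp [hx', pvH, PySem.List.min?_id_cons, PySem.List.max?_id_cons, List.foldl_append]

theorem pvInv_step (dA : PySem.Dict Int (List Int)) (dB : PySem.Dict Int (Int × Int))
    (t : Int × Int) (h : pvInv dA dB) : pvInv (pvAStep dA t) (pvBStep dB t) := by
  obtain ⟨hnd, hne, hitems⟩ := h
  have hkeys : dB.keys = dA.keys := by
    show dB.items.map (·.1) = dA.items.map (·.1)
    rw [hitems, List.map_map]; rfl
  have hndB : dB.keys.Nodup := hkeys ▸ hnd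
  have hcc : dB.contains t.2 = dA.contains t.2 := by
    rw [PySem.Dict.contains_eq_decide_mem_keys, PySem.Dict.contains_eq_decide_mem_keys, hkeys]
  by_cases hc : dA.contains t.2 = false
  · -- new row: A inserts {x}, B inserts (x, x)
    have hcB : dB.contains t.2 = false := hcc.trans hc
    have hgB : dB.get? t.2 = none := by
      have := PySem.Dict.contains_eq_isSome_get? dB t.2
      rw [hcB] at this
      exact Option.not_isSome_iff_eq_none.mp (by simp [← this])
    have hA : pvAStep dA t = dA.insert t.2 (PySem.Set.ofList [t.1]) := by
      simp [pvAStep, hc]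
    have hB : pvBStep dB t = dB.insert t.2 (t.1, t.1) := by
      simp [pvBStep, hgB]
    rw [hA, hB]
    refine ⟨PySem.Dict.nodup_keys_insert _ _ _ hnd, ?_, ?_⟩
    · intro p hp
      rw [PySem.Dict.items_insert_of_not_contains _ _ hc] at hp
      rcases List.mem_append.mp hp with h1 | h1
      · exact hne p h1
      · simp at h1; subst h1; simp [PySem.Set.ofList]
    · rw [PySem.Dict.items_insert_of_not_contains _ _ hc,
          PySem.Dict.items_insert_of_not_contains _ _ hcB, hitems, List.map_append]
      simp [pvH, PySem.Set.ofList, PySem.List.min?_id_cons, PySem.List.max?_id_cons]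
  · -- existing row: A adds x to the set, B updates the running (min, max)
    have hc' : dA.contains t.2 = true := by simpa using hc
    have hcB : dB.contains t.2 = true := hcc.trans hc'
    obtain ⟨s, hgA⟩ : ∃ s, dA.get? t.2 = some s := by
      have := PySem.Dict.contains_eq_isSome_get? dA t.2
      rw [hc'] at this
      exact Option.isSome_iff_exists.mp this.symm
    have hsmem : (t.2, s) ∈ dA.items := PySem.Dict.mem_items_of_get?_eq_some dA hgA
    have hsne : s ≠ [] := hne _ hsmem
    have hgB : dB.get? t.2 = some (pvH s) := by
      apply PySem.Dict.get?_of_mem_items dB _ hndB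
      rw [hitems]
      exact List.mem_map.mpr ⟨(t.2, s), hsmem, rfl⟩
    have hA : pvAStep dA t = dA.insert t.2 (PySem.Set.add s t.1) := by
      simp [pvAStep, hc', PySem.Dict.getD, hgA]
    have hB : pvBStep dB t = dB.insert t.2 (min (pvH s).1 t.1, max (pvH s).2 t.1) := by
      simp [pvBStep, hgB]
    rw [hA, hB]
    refine ⟨PySem.Dict.nodup_keys_insert _ _ _ hnd, ?_, ?_⟩
    · intro p hp
      rw [PySem.Dict.items_insert_of_contains _ _ hc'] at hp
      obtain ⟨q, hq, hpq⟩ := List.mem_map.mp hp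
      by_cases h1 : (q.1 == t.2) = true
      · rw [if_pos h1] at hpq; subst hpq
        show PySem.Set.add s t.1 ≠ []
        unfold PySem.Set.add
        split <;> simp [hsne]
      · rw [if_neg h1] at hpq; subst hpq; exact hne q hq
    · rw [PySem.Dict.items_insert_of_contains _ _ hc',
          PySem.Dict.items_insert_of_contains _ _ hcB, hitems, List.map_map, List.map_map]
      apply List.map_congr_left
      intro q hq
      by_cases h1 : (q.1 == t.2) = true
      · simp only [Function.comp]
        rw [if_pos h1]
        have h1' : ((q.1, pvH q.2).1 == t.2) = true := h1
        simp only [h1', if_pos]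
        rw [pvH_add s t.1 hsne]
      · simp only [Function.comp]
        rw [if_neg h1]
        have h1' : ((q.1, pvH q.2).1 == t.2) = false := by simpa using h1
        simp [h1']

-- ===== VERDICT (by name: the statement is the Claim_ definition above) =====
theorem pvInv_foldl (xs : List (Int × Int)) :
    ∀ dA dB, pvInv dA dB → pvInv (xs.foldl pvAStep dA) (xs.foldl pvBStep dB) := by
  induction xs with
  | nil => intro dA dB h; exact h
  | cons t xs ih => intro dA dB h; exact ih _ _ (pvInv_step dA dB t h)

theorem red_and_green_full_ranges_spec : Claim_equal_red_and_green_full_ranges := by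
  intro xs _
  unfold Spec_red_and_green_full_ranges red_and_green_full_ranges red_and_green_full_ranges_alt
  have h0 : pvInv PySem.Dict.empty PySem.Dict.empty := by
    refine ⟨?_, ?_, rfl⟩ <;> simp [PySem.Dict.empty, PySem.Dict.keys]
  obtain ⟨_, _, h3⟩ := pvInv_foldl xs PySem.Dict.empty PySem.Dict.empty h0
  rw [h3]
  rfl
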